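-- pv_equiv track=rewrite | github.com/sheilsplenbluli/csvwrangler | csvwrangler/coalesce.py | coalesce_with_default
-- ===== SOURCE A (Python) =====
-- def coalesce_columns(
--     rows: list[dict],
--     sources: list[str],
--     dest: str,
--     keep_sources: bool = True,
-- ) -> list[dict]:
--     """For each row, set *dest* to the first non-empty value among *sources*.
--
--     Args:
--         rows: input rows.
--         sources: ordered list of column names to check.
--         dest: name of the output column.
--         keep_sources: when False, drop the source columns from the output.
--
--     Returns:
--         New list of dicts; originals are not mutated.
--     """
--     out: list[dict] = []
--     for row in rows:
--         new_row = dict(row)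
--         value = ""
--         for col in sources:
--             v = new_row.get(col, "")
--             if v is not None and str(v).strip() != "":
--                 value = v
--                 break
--         new_row[dest] = value
--         if not keep_sources and dest not in sources:
--             for col in sources:
--                 new_row.pop(col, None)
--         out.append(new_row)
--     return out
--
-- def coalesce_with_default(
--     rows: list[dict],
--     sources: list[str],
--     dest: str,
--     default: str = "",
--     keep_sources: bool = True,
-- ) -> list[dict]:
--     """Like coalesce_columns but fills with *default* when all sources are empty."""
--     result = coalesce_columns(rows, sources, dest, keep_sources=keep_sources)
--     for row in result:
--         if str(row.get(dest, "")).strip() == "":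
--             row[dest] = default
--     return result
-- ===== SOURCE B (Python) =====
-- def coalesce_with_default(
--     rows: list[dict],
--     sources: list[str],
--     dest: str,
--     default: str = "",
--     keep_sources: bool = True,
-- ) -> list[dict]:
--     """Column-major: sweep the source COLUMNS in reverse over a values array
--     (overwrite semantics, so the leftmost non-blank source wins because it is
--     applied last, and the default seed survives only where every source is
--     blank); then one row-building pass.  No per-row break scan, no default
--     fix-up pass."""
--     n = len(rows)
--     values = [default] * n
--     for c in reversed(sources):
--         for i in range(n):
--             v = rows[i].get(c, "")
--             if v is not None and str(v).strip() != "":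
--                 values[i] = v
--     drop = not keep_sources and dest not in sources
--     out: list[dict] = []
--     for i in range(n):
--         new_row = {k: v for k, v in rows[i].items() if not (drop and k in sources)}
--         new_row[dest] = values[i]
--         out.append(new_row)
--     return out
-- ===== Notes on version B (the rewrite author's own statement) =====
-- stated objective: alternative
-- what changed: Replaces A's row-major build-then-refill two-pass pipeline (per-row copy, early-exit first-match scan over sources, pop loop, then a second pass writing the default) by a column-major algorithm: the source columns are swept in reverse order over a pre-seeded values array with overwrite semantics (the leftmost non-blank source wins because it is applied last, and the default seed survives only where every source is blank), followed by one row-building pass with a filtering dict comprehension; there is no break and no default fix-up pass.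
import Mathlib
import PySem

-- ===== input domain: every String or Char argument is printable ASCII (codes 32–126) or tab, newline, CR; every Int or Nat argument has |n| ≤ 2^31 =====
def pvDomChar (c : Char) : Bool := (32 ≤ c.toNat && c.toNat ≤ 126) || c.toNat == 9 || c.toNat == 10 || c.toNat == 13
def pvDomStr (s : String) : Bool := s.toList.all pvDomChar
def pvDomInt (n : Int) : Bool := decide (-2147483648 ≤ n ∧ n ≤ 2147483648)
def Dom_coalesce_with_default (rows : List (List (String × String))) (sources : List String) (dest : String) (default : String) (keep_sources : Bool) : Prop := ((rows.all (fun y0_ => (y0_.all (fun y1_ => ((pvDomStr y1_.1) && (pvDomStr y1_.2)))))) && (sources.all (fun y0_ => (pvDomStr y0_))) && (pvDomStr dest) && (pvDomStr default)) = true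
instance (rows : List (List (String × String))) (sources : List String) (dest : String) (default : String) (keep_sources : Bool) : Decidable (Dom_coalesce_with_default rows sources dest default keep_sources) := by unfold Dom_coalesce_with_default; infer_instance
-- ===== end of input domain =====

-- B replaces A's row-major build-then-refill two-pass pipeline by a column-major algorithm: the source columns are swept in reverse over a values array (overwrite semantics, default-seeded, no break and no default fix-up pass), then one row-building pass; objective: alternative.


-- ===== PORT A =====
-- inner 'for col in sources: … break' of coalesce_columns ('v is not None' is always true for str values; str(v) is v)
def pvPickSource (new_row : PySem.Dict String String) : List String → String
  | [] => ""
  | col :: rest =>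
      let v := new_row.getD col ""
      if PySem.Str.strip v ≠ "" then v else pvPickSource new_row rest

def coalesce_columns (rows : List (List (String × String))) (sources : List String) (dest : String) (keep_sources : Bool) : List (List (String × String)) :=
  rows.foldl (fun out row =>
    let new_row : PySem.Dict String String := ⟨row⟩   -- new_row = dict(row)
    let value := pvPickSource new_row sources
    let new_row := new_row.insert dest value
    let new_row := if !keep_sources && !(sources.contains dest)
                   then sources.foldl (fun d col => d.erase col) new_row   -- new_row.pop(col, None)
                   else new_row
    out ++ [new_row.items]) []

def coalesce_with_default (rows : List (List (String × String))) (sources : List String) (dest : String) (default : String) (keep_sources : Bool) : List (List (String × String)) :=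
  let result := coalesce_columns rows sources dest keep_sources
  result.map (fun row =>
    let d : PySem.Dict String String := ⟨row⟩
    if PySem.Str.strip (d.getD dest "") = "" then (d.insert dest default).items else row)

-- ===== PORT B =====
-- Source B inner 'for i in range(n)' of one column sweep: overwrite values[i] where rows[i][c] is non-blank
-- (rows[i] / values[i] are ported with getD: i ranges over range(n) so both indices are always in range)
def pvColSweep (rows : List (List (String × String))) (c : String) (n : Nat) (vals : List String) : List String :=
  (List.range n).foldl (fun vals i =>
      let v := (⟨rows.getD i []⟩ : PySem.Dict String String).getD c ""   -- rows[i].get(c, "")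
      if PySem.Str.strip v ≠ "" then vals.set i v else vals) vals

def coalesce_with_default_alt (rows : List (List (String × String))) (sources : List String) (dest : String) (default : String) (keep_sources : Bool) : List (List (String × String)) :=
  let n := rows.length
  let values := List.replicate n default                                  -- values = [default] * n
  let values := sources.reverse.foldl (fun vals c => pvColSweep rows c n vals) values   -- for c in reversed(sources)
  let drop := !keep_sources && !(sources.contains dest)
  (List.range n).foldl (fun out i =>
      let row := rows.getD i []                                           -- rows[i]
      let new_row : PySem.Dict String String :=
        ⟨row.filter (fun kv => !(drop && sources.contains kv.1))⟩         -- dict comprehension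
      out ++ [(new_row.insert dest (values.getD i "")).items]) []         -- new_row[dest] = values[i]

-- ===== PRECONDITION & SPEC =====
def Spec_coalesce_with_default (rows : List (List (String × String))) (sources : List String) (dest : String) (default : String) (keep_sources : Bool) (out : List (List (String × String))) : Prop := out = coalesce_with_default_alt rows sources dest default keep_sources
instance (rows : List (List (String × String))) (sources : List String) (dest : String) (default : String) (keep_sources : Bool) (out : List (List (String × String))) : Decidable (Spec_coalesce_with_default rows sources dest default keep_sources out) := by unfold Spec_coalesce_with_default; infer_instance

-- ===== CLAIM (what is proved, stated in full; the proofs are below) =====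
def Claim_equal_coalesce_with_default : Prop := ∀ (rows : List (List (String × String))) (sources : List String) (dest : String) (default : String) (keep_sources : Bool), Dom_coalesce_with_default rows sources dest default keep_sources → Spec_coalesce_with_default rows sources dest default keep_sources (coalesce_with_default rows sources dest default keep_sources)

-- ===== LEMMAS AND PROOFS =====

-- the Option-valued first-non-blank scan, used only in the proofs to relate the two value computations
def pvFirstVal (row : PySem.Dict String String) : List String → Option String
  | [] => none
  | c :: rest =>
      let v := row.getD c ""
      if PySem.Str.strip v ≠ "" then some v else pvFirstVal row rest

-- A's pick is the Option-valued scan with "" as fallback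
theorem pick_eq_firstVal (d : PySem.Dict String String) (ss : List String) :
    pvPickSource d ss = (pvFirstVal d ss).getD "" := by
  induction ss with
  | nil => rfl
  | cons c rest ih =>
      simp only [pvPickSource, pvFirstVal]
      split_ifs <;> simp [ih]

theorem firstVal_some_not_blank (d : PySem.Dict String String) (ss : List String) (v : String)
    (h : pvFirstVal d ss = some v) : PySem.Str.strip v ≠ "" := by
  induction ss with
  | nil => simp [pvFirstVal] at h
  | cons c rest ih =>
      simp only [pvFirstVal] at h
      split_ifs at h with hc
      · cases h; exact hc
      · exact ih h

-- a reversed overwrite-fold computes the first non-blank source value, falling back to the seed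
theorem revfold_eq_firstVal (r : PySem.Dict String String) (ss : List String) (seed : String) :
    ss.reverse.foldl
      (fun acc c => let v := r.getD c ""; if PySem.Str.strip v ≠ "" then v else acc) seed
    = (pvFirstVal r ss).getD seed := by
  rw [List.foldl_reverse]
  induction ss with
  | nil => rfl
  | cons c rest ih =>
      simp only [List.foldr_cons, pvFirstVal, ih]
      split_ifs <;> simp

-- one column sweep preserves the length of the values array
theorem colSweep_length (rows : List (List (String × String))) (c : String) (n : Nat)
    (vals : List String) : (pvColSweep rows c n vals).length = vals.length := by
  unfold pvColSweep
  induction (List.range n) generalizing vals with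
  | nil => rfl
  | cons j rest ih =>
      rw [List.foldl_cons, ih]
      by_cases h : PySem.Str.strip ((⟨rows.getD j []⟩ : PySem.Dict String String).getD c "") = "" <;>
        (rw [List.getD_eq_getElem?_getD] at h; simp [h])

-- one column sweep acts pointwise: cell i gets the overwrite step for column c at row i
theorem colSweep_getD (rows : List (List (String × String))) (c : String) (m : Nat)
    (vals : List String) (d : String) (i : Nat) (hi : i < vals.length) :
    (pvColSweep rows c m vals).getD i d
      = if i < m then
          (if PySem.Str.strip ((⟨rows.getD i []⟩ : PySem.Dict String String).getD c "") ≠ ""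
           then (⟨rows.getD i []⟩ : PySem.Dict String String).getD c "" else vals.getD i d)
        else vals.getD i d := by
  induction m with
  | zero => simp [pvColSweep]
  | succ m ih =>
      have hstep : pvColSweep rows c (m + 1) vals
          = (if PySem.Str.strip ((⟨rows.getD m []⟩ : PySem.Dict String String).getD c "") ≠ ""
             then (pvColSweep rows c m vals).set m ((⟨rows.getD m []⟩ : PySem.Dict String String).getD c "")
             else pvColSweep rows c m vals) := by
        unfold pvColSweep
        rw [List.range_succ, List.foldl_append, List.foldl_cons, List.foldl_nil]
      have hlen : (pvColSweep rows c m vals).length = vals.length := colSweep_length rows c m vals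
      rw [hstep]
      by_cases hc : PySem.Str.strip ((⟨rows.getD m []⟩ : PySem.Dict String String).getD c "") ≠ ""
      · rw [if_pos hc]
        by_cases him : i = m
        · subst him
          rw [List.getD_eq_getElem?_getD, List.getElem?_set_self (by rw [hlen]; exact hi)]
          have hc2 := hc
          rw [List.getD_eq_getElem?_getD] at hc2
          simp [Nat.lt_succ_self, hc2]
        · rw [List.getD_eq_getElem?_getD, List.getElem?_set_ne (fun h => him h.symm),
            ← List.getD_eq_getElem?_getD, ih]
          by_cases hlt : i < m
          · simp [hlt, Nat.lt_succ_of_lt hlt]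
          · have h2 : ¬ i < m + 1 := by omega
            simp [hlt, h2]
      · rw [if_neg hc, ih]
        by_cases him : i = m
        · subst him
          have hc' : PySem.Str.strip ((⟨rows.getD i []⟩ : PySem.Dict String String).getD c "") = "" :=
            not_ne_iff.mp hc
          rw [List.getD_eq_getElem?_getD] at hc'
          simp [hc', Nat.lt_irrefl, Nat.lt_succ_self]
        · by_cases hlt : i < m
          · simp [hlt, Nat.lt_succ_of_lt hlt]
          · have h2 : ¬ i < m + 1 := by omega
            simp [hlt, h2]

-- sweeping all columns acts pointwise: cell i is the reversed overwrite-fold for row i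
theorem sweep_all_getD (rows : List (List (String × String))) (ss : List String)
    (vals : List String) (d : String) (i : Nat) (hi : i < vals.length)
    (hn : vals.length = rows.length) :
    (ss.foldl (fun vals c => pvColSweep rows c rows.length vals) vals).getD i d
      = ss.foldl
          (fun acc c =>
            let v := (⟨rows.getD i []⟩ : PySem.Dict String String).getD c ""
            if PySem.Str.strip v ≠ "" then v else acc) (vals.getD i d) := by
  induction ss generalizing vals with
  | nil => rfl
  | cons c rest ih =>
      rw [List.foldl_cons, List.foldl_cons,
        ih (pvColSweep rows c rows.length vals)
          (by rw [colSweep_length]; exact hi) (by rw [colSweep_length]; exact hn),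
        colSweep_getD rows c rows.length vals d i hi]
      have hl : i < rows.length := hn ▸ hi
      simp [hl]

-- B's recursion-free pipeline is the map of its per-row body over rows
theorem alt_eq_map (rows : List (List (String × String))) (sources : List String)
    (dest default : String) (keep_sources : Bool) :
    coalesce_with_default_alt rows sources dest default keep_sources
      = rows.map (fun row =>
          let value := ((pvFirstVal (⟨row⟩ : PySem.Dict String String) sources).getD default)
          let drop := !keep_sources && !(sources.contains dest)
          let new_row : PySem.Dict String String :=
            ⟨row.filter (fun kv => !(drop && sources.contains kv.1))⟩
          (new_row.insert dest value).items) := by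
  unfold coalesce_with_default_alt
  rw [PySem.List.foldl_append_singleton_eq_map]
  simp only [List.nil_append]
  apply List.ext_getElem
  · simp
  · intro j h1 h2
    have hj : j < rows.length := by simpa using h2
    have hrep : (List.replicate rows.length default).length = rows.length := by simp
    have hval :
        ((sources.reverse.foldl (fun vals c => pvColSweep rows c rows.length vals)
            (List.replicate rows.length default)).getD j "")
          = (pvFirstVal (⟨rows.getD j []⟩ : PySem.Dict String String) sources).getD default := by
      rw [sweep_all_getD rows sources.reverse (List.replicate rows.length default) "" j
          (by rw [hrep]; exact hj) hrep]
      have hseed : (List.replicate rows.length default).getD j "" = default := by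
        rw [List.getD_eq_getElem?_getD]
        simp [List.getElem?_replicate, hj]
      rw [hseed]
      exact revfold_eq_firstVal (⟨rows.getD j []⟩ : PySem.Dict String String) sources default
    simp only [List.getElem_map, List.getElem_range, hval]
    have hrow : rows.getD j [] = rows[j] := by
      rw [List.getD_eq_getElem?_getD, List.getElem?_eq_getElem hj]; rfl
    rw [hrow]

-- folding erase over a key list filters the items by those keys
theorem foldl_erase_items (ss : List String) (d : PySem.Dict String String) :
    (ss.foldl (fun d col => d.erase col) d).items
      = d.items.filter (fun p => !(ss.contains p.1)) := by
  induction ss generalizing d with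
  | nil => simp
  | cons c rest ih =>
      rw [List.foldl_cons, ih]
      simp only [PySem.Dict.erase, List.filter_filter]
      apply List.filter_congr
      intro p _
      simp only [List.contains_cons]
      by_cases h : p.1 = c <;> simp [h, Bool.and_comm]

-- inserting a key the filter keeps commutes with filtering the items by keys
theorem insert_filter_comm (r : List (String × String)) (q : String → Bool)
    (dest v : String) (hq : q dest = true) :
    ((⟨r.filter (fun p => q p.1)⟩ : PySem.Dict String String).insert dest v).items
      = (((⟨r⟩ : PySem.Dict String String).insert dest v).items).filter (fun p => q p.1) := by
  have hcont : (⟨r.filter (fun p => q p.1)⟩ : PySem.Dict String String).contains dest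
      = (⟨r⟩ : PySem.Dict String String).contains dest := by
    simp only [PySem.Dict.contains, List.any_filter]
    refine List.any_congr rfl (fun p => ?_)
    by_cases h : p.1 = dest <;> simp [h, hq]
  simp only [PySem.Dict.insert, hcont]
  by_cases h : (⟨r⟩ : PySem.Dict String String).contains dest = true
  · simp only [h, if_true]
    rw [List.filter_map]
    congr 1
    apply List.filter_congr
    intro p _
    by_cases hpd : p.1 = dest <;> simp [Function.comp, hpd, hq]
  · simp [h, List.filter_append, hq]

-- under '!keep_sources and dest not in sources', A's insert-then-pop dict equals B's filter-then-insert dict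
theorem erased_eq (sources : List String) (dest : String) (hkc : sources.contains dest = false)
    (row : List (String × String)) (val : String) :
    sources.foldl (fun d col => d.erase col) ((⟨row⟩ : PySem.Dict String String).insert dest val)
      = (⟨row.filter (fun kv => !(sources.contains kv.1))⟩ : PySem.Dict String String).insert dest val := by
  apply PySem.Dict.ext
  rw [foldl_erase_items, insert_filter_comm row (fun k => !(sources.contains k)) dest val (by simpa using hkc)]

-- per-row equality: A's copy/insert/pop row followed by the default fix-up equals B's one-shot row
theorem row_eq (sources : List String) (dest default : String) (keep_sources : Bool)
    (row : List (String × String)) :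
    (let r1 : List (String × String) :=
        (let new_row : PySem.Dict String String := ⟨row⟩
         let value := pvPickSource new_row sources
         let new_row := new_row.insert dest value
         let new_row := if !keep_sources && !(sources.contains dest)
                        then sources.foldl (fun d col => d.erase col) new_row
                        else new_row
         new_row.items)
     let d : PySem.Dict String String := ⟨r1⟩
     if PySem.Str.strip (d.getD dest "") = "" then (d.insert dest default).items else r1)
    = (let value := ((pvFirstVal (⟨row⟩ : PySem.Dict String String) sources).getD default)
       let drop := !keep_sources && !(sources.contains dest)
       let new_row : PySem.Dict String String :=
         ⟨row.filter (fun kv => !(drop && sources.contains kv.1))⟩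
       (new_row.insert dest value).items) := by
  by_cases hk : (!keep_sources && !(sources.contains dest)) = true
  · have hkc : sources.contains dest = false := by
      cases h : sources.contains dest <;> simp_all
    simp only [hk, if_true]
    have hfilt : row.filter (fun kv => !(true && sources.contains kv.1))
        = row.filter (fun kv => !(sources.contains kv.1)) := by
      simp
    rw [hfilt,
      erased_eq sources dest hkc row (pvPickSource (⟨row⟩ : PySem.Dict String String) sources)]
    cases hF : pvFirstVal (⟨row⟩ : PySem.Dict String String) sources with
    | none =>
        have hpick : pvPickSource (⟨row⟩ : PySem.Dict String String) sources = "" := by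
          rw [pick_eq_firstVal, hF]; rfl
        rw [hpick]
        have hget : ((⟨row.filter (fun kv => !(sources.contains kv.1))⟩ : PySem.Dict String String).insert dest "").getD dest "" = "" :=
          PySem.Dict.getD_insert_self _ _ _ _
        show (if PySem.Str.strip (((⟨row.filter (fun kv => !(sources.contains kv.1))⟩ : PySem.Dict String String).insert dest "").getD dest "") = ""
              then ((((⟨row.filter (fun kv => !(sources.contains kv.1))⟩ : PySem.Dict String String).insert dest "").insert dest default)).items
              else ((⟨row.filter (fun kv => !(sources.contains kv.1))⟩ : PySem.Dict String String).insert dest "").items) = _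
        rw [hget, if_pos (show PySem.Str.strip "" = "" by decide), PySem.Dict.insert_insert_self]
        rfl
    | some v =>
        have hpick : pvPickSource (⟨row⟩ : PySem.Dict String String) sources = v := by
          rw [pick_eq_firstVal, hF]; rfl
        have hv := firstVal_some_not_blank _ _ _ hF
        rw [hpick]
        have hget : ((⟨row.filter (fun kv => !(sources.contains kv.1))⟩ : PySem.Dict String String).insert dest v).getD dest "" = v :=
          PySem.Dict.getD_insert_self _ _ _ _
        show (if PySem.Str.strip (((⟨row.filter (fun kv => !(sources.contains kv.1))⟩ : PySem.Dict String String).insert dest v).getD dest "") = ""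
              then ((((⟨row.filter (fun kv => !(sources.contains kv.1))⟩ : PySem.Dict String String).insert dest v).insert dest default)).items
              else ((⟨row.filter (fun kv => !(sources.contains kv.1))⟩ : PySem.Dict String String).insert dest v).items) = _
        rw [hget, if_neg hv]
        rfl
  · have hk' : (!keep_sources && !(sources.contains dest)) = false := by
      cases h : (!keep_sources && !(sources.contains dest)) <;> simp_all
    simp only [hk', Bool.false_eq_true, if_false]
    have hfilt : row.filter (fun kv => !(false && sources.contains kv.1)) = row := by
      simp
    rw [hfilt]
    cases hF : pvFirstVal (⟨row⟩ : PySem.Dict String String) sources with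
    | none =>
        have hpick : pvPickSource (⟨row⟩ : PySem.Dict String String) sources = "" := by
          rw [pick_eq_firstVal, hF]; rfl
        rw [hpick]
        have hget : ((⟨row⟩ : PySem.Dict String String).insert dest "").getD dest "" = "" :=
          PySem.Dict.getD_insert_self _ _ _ _
        show (if PySem.Str.strip (((⟨row⟩ : PySem.Dict String String).insert dest "").getD dest "") = ""
              then ((((⟨row⟩ : PySem.Dict String String).insert dest "").insert dest default)).items
              else ((⟨row⟩ : PySem.Dict String String).insert dest "").items) = _
        rw [hget, if_pos (show PySem.Str.strip "" = "" by decide), PySem.Dict.insert_insert_self]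
        rfl
    | some v =>
        have hpick : pvPickSource (⟨row⟩ : PySem.Dict String String) sources = v := by
          rw [pick_eq_firstVal, hF]; rfl
        have hv := firstVal_some_not_blank _ _ _ hF
        rw [hpick]
        have hget : ((⟨row⟩ : PySem.Dict String String).insert dest v).getD dest "" = v :=
          PySem.Dict.getD_insert_self _ _ _ _
        show (if PySem.Str.strip (((⟨row⟩ : PySem.Dict String String).insert dest v).getD dest "") = ""
              then ((((⟨row⟩ : PySem.Dict String String).insert dest v).insert dest default)).items
              else ((⟨row⟩ : PySem.Dict String String).insert dest v).items) = _
        rw [hget, if_neg hv]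
        rfl

-- ===== VERDICT (by name: the statement is the Claim_ definition above) =====
set_option maxHeartbeats 1000000 in
theorem coalesce_with_default_spec : Claim_equal_coalesce_with_default := by
  intro rows sources dest default keep_sources _
  unfold Spec_coalesce_with_default
  rw [alt_eq_map]
  unfold coalesce_with_default coalesce_columns
  rw [PySem.List.foldl_append_singleton_eq_map]
  simp only [List.nil_append, List.map_map]
  apply List.map_congr_left
  intro row _
  exact row_eq sources dest default keep_sources row
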